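-- pv_equiv track=rewrite | github.com/indigoYoshimaru/google-foobar | level4/bringing-a-gun-to-a-trainer-fight/solution.py | project_x
-- ===== SOURCE A (Python) =====
-- def project_x(pos, dim, x):
--     right, left = [], []
--     positive_proj_pos = pos
--     negative_proj_pos = pos
--     for i in range(1,x+2):
--         positive_proj_pos = [2*i*dim[0] - positive_proj_pos[0], positive_proj_pos[1]]
--         negative_proj_pos = [-2*(i-1)*dim[0] - negative_proj_pos[0], negative_proj_pos[1]]
--         right.append(positive_proj_pos)
--         left.append(negative_proj_pos)
--     return right + left
-- ===== SOURCE B (Python) =====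
-- def project_x(pos, dim, x):
--     rng = range(1, x + 2)
--     right = [[(i + 1) * dim[0] - pos[0], pos[1]] if i % 2 else [i * dim[0] + pos[0], pos[1]]
--              for i in rng]
--     left = [[-(i - 1) * dim[0] - pos[0], pos[1]] if i % 2 else [-i * dim[0] + pos[0], pos[1]]
--             for i in rng]
--     return right + left
-- ===== Notes on version B (the rewrite author's own statement) =====
-- stated objective: simpler
-- what changed: The two coupled reflection recurrences carried through the loop are replaced by closed-form per-index parity formulas, so each element is computed independently by a comprehension with no accumulator.
import Mathlib
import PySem

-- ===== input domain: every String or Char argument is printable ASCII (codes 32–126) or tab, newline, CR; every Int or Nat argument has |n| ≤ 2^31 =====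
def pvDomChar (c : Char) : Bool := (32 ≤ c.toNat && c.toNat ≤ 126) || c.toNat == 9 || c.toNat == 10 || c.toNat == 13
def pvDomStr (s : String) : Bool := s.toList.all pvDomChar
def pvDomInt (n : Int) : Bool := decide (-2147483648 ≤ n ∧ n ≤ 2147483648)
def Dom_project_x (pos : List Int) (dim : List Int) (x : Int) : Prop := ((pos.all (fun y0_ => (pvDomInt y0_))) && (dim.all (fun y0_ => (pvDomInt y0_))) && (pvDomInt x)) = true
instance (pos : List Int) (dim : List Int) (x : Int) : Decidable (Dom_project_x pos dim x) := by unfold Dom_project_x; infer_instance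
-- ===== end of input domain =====

-- B replaces the loop-carried reflection recurrences by closed-form per-index parity formulas (objective: simpler).

-- ===== PORT A =====
-- loop body of A: state = (right, left, positive_proj_pos, negative_proj_pos)
def pvStepA (dim : List Int)
    (s : List (List Int) × List (List Int) × List Int × List Int) (i : Int) :
    List (List Int) × List (List Int) × List Int × List Int :=
  let p := [2 * i * PySem.List.pyGetD dim 0 0 - PySem.List.pyGetD s.2.2.1 0 0,
            PySem.List.pyGetD s.2.2.1 1 0]
  let n := [-2 * (i - 1) * PySem.List.pyGetD dim 0 0 - PySem.List.pyGetD s.2.2.2 0 0,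
            PySem.List.pyGetD s.2.2.2 1 0]
  (s.1 ++ [p], s.2.1 ++ [n], p, n)

def project_x (pos : List Int) (dim : List Int) (x : Int) : List (List Int) :=
  let st := (PySem.List.pyRange 1 (x + 2) 1).foldl (pvStepA dim) ([], [], pos, pos)
  st.1 ++ st.2.1

-- ===== PORT B =====
def pvRightB (pos : List Int) (dim : List Int) (i : Int) : List Int :=
  if PySem.Int.mod i 2 = 1 then
    [(i + 1) * PySem.List.pyGetD dim 0 0 - PySem.List.pyGetD pos 0 0, PySem.List.pyGetD pos 1 0]
  else
    [i * PySem.List.pyGetD dim 0 0 + PySem.List.pyGetD pos 0 0, PySem.List.pyGetD pos 1 0]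

def pvLeftB (pos : List Int) (dim : List Int) (i : Int) : List Int :=
  if PySem.Int.mod i 2 = 1 then
    [-(i - 1) * PySem.List.pyGetD dim 0 0 - PySem.List.pyGetD pos 0 0, PySem.List.pyGetD pos 1 0]
  else
    [-i * PySem.List.pyGetD dim 0 0 + PySem.List.pyGetD pos 0 0, PySem.List.pyGetD pos 1 0]

def project_x_alt (pos : List Int) (dim : List Int) (x : Int) : List (List Int) :=
  (PySem.List.pyRange 1 (x + 2) 1).map (pvRightB pos dim)
    ++ (PySem.List.pyRange 1 (x + 2) 1).map (pvLeftB pos dim)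

-- ===== PRECONDITION & SPEC =====
-- Pre_ excludes exactly the inputs where A raises IndexError: when the loop runs (x+2 > 1),
-- A reads pos[0], pos[1] and dim[0].
def Pre_project_x (pos : List Int) (dim : List Int) (x : Int) : Prop :=
  x + 2 ≤ 1 ∨ (2 ≤ pos.length ∧ 1 ≤ dim.length)
instance (pos : List Int) (dim : List Int) (x : Int) : Decidable (Pre_project_x pos dim x) := by
  unfold Pre_project_x; infer_instance

def pvWitness_project_x : List Int × List Int × Int := ([2, 3], [5], 2)

def Spec_project_x (pos : List Int) (dim : List Int) (x : Int) (out : List (List Int)) : Prop := out = project_x_alt pos dim x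
instance (pos : List Int) (dim : List Int) (x : Int) (out : List (List Int)) : Decidable (Spec_project_x pos dim x out) := by unfold Spec_project_x; infer_instance

-- ===== CLAIM (what is proved, stated in full; the proofs are below) =====
def Claim_equal_project_x : Prop := ∀ (pos : List Int) (dim : List Int) (x : Int), Dom_project_x pos dim x → Pre_project_x pos dim x → Spec_project_x pos dim x (project_x pos dim x)

-- ===== LEMMAS AND PROOFS =====

-- closed-form first coordinates of the two carried states
def pvPF (pos : List Int) (dim : List Int) (i : Int) : Int :=
  if PySem.Int.mod i 2 = 1 then (i + 1) * PySem.List.pyGetD dim 0 0 - PySem.List.pyGetD pos 0 0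
  else i * PySem.List.pyGetD dim 0 0 + PySem.List.pyGetD pos 0 0

def pvNF (pos : List Int) (dim : List Int) (i : Int) : Int :=
  if PySem.Int.mod i 2 = 1 then -(i - 1) * PySem.List.pyGetD dim 0 0 - PySem.List.pyGetD pos 0 0
  else -i * PySem.List.pyGetD dim 0 0 + PySem.List.pyGetD pos 0 0

lemma pvRightB_eq (pos dim : List Int) (i : Int) :
    pvRightB pos dim i = [pvPF pos dim i, PySem.List.pyGetD pos 1 0] := by
  unfold pvRightB pvPF; split_ifs <;> rfl

lemma pvLeftB_eq (pos dim : List Int) (i : Int) :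
    pvLeftB pos dim i = [pvNF pos dim i, PySem.List.pyGetD pos 1 0] := by
  unfold pvLeftB pvNF; split_ifs <;> rfl

lemma pvPF_step (pos dim : List Int) (k : Nat) :
    2 * ((k : Int) + 1) * PySem.List.pyGetD dim 0 0 - pvPF pos dim k = pvPF pos dim ((k : Int) + 1) := by
  unfold pvPF
  simp only [PySem.Int.mod_eq_emod_of_pos (show (0:Int) < 2 by norm_num)]
  split_ifs
  · exfalso; omega
  · ring
  · ring
  · exfalso; omega

lemma pvNF_step (pos dim : List Int) (k : Nat) :
    -2 * ((k : Int) + 1 - 1) * PySem.List.pyGetD dim 0 0 - pvNF pos dim k = pvNF pos dim ((k : Int) + 1) := by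
  unfold pvNF
  simp only [PySem.Int.mod_eq_emod_of_pos (show (0:Int) < 2 by norm_num)]
  split_ifs
  · exfalso; omega
  · ring
  · ring
  · exfalso; omega

lemma pv_inv (pos dim : List Int) (k : Nat) :
    (PySem.List.pyRange 1 (1 + k) 1).foldl (pvStepA dim) ([], [], pos, pos) =
      ((PySem.List.pyRange 1 (1 + k) 1).map (pvRightB pos dim),
       (PySem.List.pyRange 1 (1 + k) 1).map (pvLeftB pos dim),
       (if k = 0 then pos else [pvPF pos dim k, PySem.List.pyGetD pos 1 0]),
       (if k = 0 then pos else [pvNF pos dim k, PySem.List.pyGetD pos 1 0])) := by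
  induction k with
  | zero =>
      simp
  | succ k ih =>
      have hsplit : PySem.List.pyRange 1 (1 + (↑(k + 1) : Int)) 1
          = PySem.List.pyRange 1 (1 + (k : Int)) 1 ++ [1 + (k : Int)] := by
        have := PySem.List.pyRange_one_succ_right (a := 1) (b := 1 + (k : Int)) (by omega)
        push_cast
        rw [show (1 : Int) + ((k : Int) + 1) = (1 + (k : Int)) + 1 by ring]
        exact this
      rw [hsplit, List.foldl_append, ih, List.map_append, List.map_append]
      have hp0 : PySem.List.pyGetD (if k = 0 then pos else [pvPF pos dim k, PySem.List.pyGetD pos 1 0]) 0 0 = pvPF pos dim k := by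
        by_cases hk : k = 0
        · subst hk
          simp [pvPF, PySem.Int.mod]
        · simp [hk, PySem.List.pyGetD_zero_cons]
      have hn0 : PySem.List.pyGetD (if k = 0 then pos else [pvNF pos dim k, PySem.List.pyGetD pos 1 0]) 0 0 = pvNF pos dim k := by
        by_cases hk : k = 0
        · subst hk
          simp [pvNF, PySem.Int.mod]
        · simp [hk, PySem.List.pyGetD_zero_cons]
      have hp1 : PySem.List.pyGetD (if k = 0 then pos else [pvPF pos dim k, PySem.List.pyGetD pos 1 0]) 1 0 = PySem.List.pyGetD pos 1 0 := by
        by_cases hk : k = 0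
        · subst hk; simp
        · simp [hk]
          rw [show (1 : Int) = ((1 : Nat) : Int) by norm_num, PySem.List.pyGetD_natCast]
          rfl
      have hn1 : PySem.List.pyGetD (if k = 0 then pos else [pvNF pos dim k, PySem.List.pyGetD pos 1 0]) 1 0 = PySem.List.pyGetD pos 1 0 := by
        by_cases hk : k = 0
        · subst hk; simp
        · simp [hk]
          rw [show (1 : Int) = ((1 : Nat) : Int) by norm_num, PySem.List.pyGetD_natCast]
          rfl
      simp only [List.foldl_cons, List.foldl_nil, pvStepA, hp0, hn0, hp1, hn1]
      have hi : (1 : Int) + (k : Int) = (k : Int) + 1 := by ring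
      rw [hi]
      have hP := pvPF_step pos dim k
      have hN : -2 * ((k : Int) + 1 - 1) * PySem.List.pyGetD dim 0 0 - pvNF pos dim k = pvNF pos dim ((k : Int) + 1) := pvNF_step pos dim k
      simp only [Nat.succ_ne_zero, if_false]
      push_cast
      rw [show (2 : Int) * ((k : Int) + 1) * PySem.List.pyGetD dim 0 0 - pvPF pos dim k
            = pvPF pos dim ((k : Int) + 1) by linarith [hP],
          show (-2 : Int) * ((k : Int) + 1 - 1) * PySem.List.pyGetD dim 0 0 - pvNF pos dim k
            = pvNF pos dim ((k : Int) + 1) by linarith [hN]]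
      simp [pvRightB_eq, pvLeftB_eq]

-- ===== VERDICT (by name: the statement is the Claim_ definition above) =====
theorem project_x_spec : Claim_equal_project_x := by
  intro pos dim x _ _hpre
  unfold Spec_project_x project_x project_x_alt
  by_cases hx : x + 2 ≤ 1
  · simp [PySem.List.pyRange_one_eq_nil hx]
  · have hk : x + 2 = 1 + ((x + 1).toNat : Int) := by omega
    rw [hk, pv_inv pos dim]
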